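-- pv_equiv track=rewrite | github.com/JWGoedvolk/BitmapText | test.py | pcs2row
-- ===== SOURCE A (Python) =====
-- PIXELWIDTH = 32
--
-- PIXELHEIGHT = 32
--
-- def pcs2row(pcs: list): #takes in a list of pixels and returns a 2d list of pixel with the image width and height
--     pixelX = 0 #horizontal position from left to right
--     pixelY = 0 #vertical   position from bottom to top
--     pixelBlock = [] #will hold the list for the rows
--     while pixelY < PIXELHEIGHT: #we are not yet at the top
--         pixelRow = [] #new row
--         pixelX = 0
--         while pixelX < PIXELWIDTH: #we have not reached the end of the row
--             if (pixelY * PIXELWIDTH) + pixelX < len(pcs): #we still have pixels to add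
--                 pixelRow.append(pcs[(pixelY * PIXELWIDTH) + pixelX])
--             else: #no more pixels so fills the rest with "none"s
--                 pixelRow.append("none")
--             pixelX += 1
--         pixelBlock.append(pixelRow) #add the row to the block
--         pixelY += 1
--     return pixelBlock #give back the block of pixels
-- ===== SOURCE B (Python) =====
-- PIXELWIDTH = 32
--
-- PIXELHEIGHT = 32
--
-- def pcs2row(pcs: list):
--     total = PIXELWIDTH * PIXELHEIGHT
--     flat = list(pcs[:total]) + ["none"] * max(0, total - len(pcs))
--     return [flat[i * PIXELWIDTH:(i + 1) * PIXELWIDTH] for i in range(PIXELHEIGHT)]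
-- ===== Notes on version B (the rewrite author's own statement) =====
-- stated objective: simpler
-- what changed: A fills the 32x32 grid with nested while loops and a per-pixel bounds check; B builds one padded flat buffer (truncate to 1024, pad with 'none') and chunks it into 32 row slices.
import Mathlib
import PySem

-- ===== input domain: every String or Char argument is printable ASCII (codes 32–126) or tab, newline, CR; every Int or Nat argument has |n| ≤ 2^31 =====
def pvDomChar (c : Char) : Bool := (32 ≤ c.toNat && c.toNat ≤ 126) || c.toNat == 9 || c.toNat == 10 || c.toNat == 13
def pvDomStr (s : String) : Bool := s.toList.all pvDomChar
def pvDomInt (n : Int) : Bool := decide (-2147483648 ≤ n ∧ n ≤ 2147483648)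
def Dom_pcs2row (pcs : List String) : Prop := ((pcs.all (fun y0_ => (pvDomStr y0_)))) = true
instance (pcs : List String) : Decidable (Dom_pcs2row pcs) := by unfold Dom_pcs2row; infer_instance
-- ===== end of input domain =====

-- B replaces A's nested while loops with a per-pixel bounds check by one padded
-- flat buffer (truncate to 1024, pad with "none") chunked into 32 row slices (objective: simpler).

-- ===== PORT A =====
-- A: while pixelY < 32: build a row by while pixelX < 32, testing the flat index
-- against len(pcs) for every cell; ported as folds over pyRange appending singletons.
def pcs2row (pcs : List String) : List (List String) :=
  (PySem.List.pyRange 0 32).foldl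
    (fun pixelBlock pixelY =>
      pixelBlock ++
        [(PySem.List.pyRange 0 32).foldl
          (fun pixelRow pixelX =>
            pixelRow ++
              [if pixelY * 32 + pixelX < (pcs.length : Int) then
                  PySem.List.pyGetD pcs (pixelY * 32 + pixelX) "none"
                else "none"])
          []])
    []

-- ===== PORT B =====
-- B: flat = pcs[:1024] + ["none"] * max(0, 1024 - len(pcs)); rows are flat[i*32:(i+1)*32].
def pcs2row_alt (pcs : List String) : List (List String) :=
  let flat := PySem.List.slice pcs none (some 1024) ++
    List.replicate (max 0 (1024 - (pcs.length : Int))).toNat "none"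
  (PySem.List.pyRange 0 32).map (fun i =>
    PySem.List.slice flat (some (i * 32)) (some ((i + 1) * 32)))

-- ===== PRECONDITION & SPEC =====
def Spec_pcs2row (pcs : List String) (out : List (List String)) : Prop := out = pcs2row_alt pcs
instance (pcs : List String) (out : List (List String)) : Decidable (Spec_pcs2row pcs out) := by unfold Spec_pcs2row; infer_instance

-- ===== CLAIM (what is proved, stated in full; the proofs are below) =====
def Claim_equal_pcs2row : Prop := ∀ (pcs : List String), Dom_pcs2row pcs → Spec_pcs2row pcs (pcs2row pcs)

-- ===== LEMMAS AND PROOFS =====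

-- the value every cell of the grid holds, indexed by the flat position
def pvCell (pcs : List String) (k : Nat) : String :=
  if k < pcs.length then pcs.getD k "none" else "none"

lemma pvRange32 : PySem.List.pyRange 0 32 = (List.range 32).map (fun k : Nat => (k : Int)) := by
  rw [show (32 : ℤ) = ((32 : ℕ) : ℤ) from rfl, PySem.List.pyRange_zero_natCast]

lemma pcs2row_eq_cells (pcs : List String) :
    pcs2row pcs =
      (List.range 32).map (fun y => (List.range 32).map (fun x => pvCell pcs (y * 32 + x))) := by
  unfold pcs2row
  rw [pvRange32]
  simp only [List.foldl_map, PySem.List.foldl_append_singleton_eq_map, List.nil_append,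
]
  refine List.map_congr_left (fun y hy => ?_)
  refine List.map_congr_left (fun x hx => ?_)
  have hidx : (y : Int) * 32 + (x : Int) = ((y * 32 + x : Nat) : Int) := by push_cast; ring
  rw [hidx, PySem.List.pyGetD_natCast]
  unfold pvCell
  by_cases h : y * 32 + x < pcs.length
  · rw [if_pos (by exact_mod_cast h), if_pos h]
  · rw [if_neg (by exact_mod_cast h), if_neg h]

-- the padded flat buffer
def pvFlat (pcs : List String) : List String :=
  pcs.take 1024 ++ List.replicate (1024 - pcs.length) "none"

lemma pvFlat_length (pcs : List String) : (pvFlat pcs).length = 1024 := by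
  simp [pvFlat]; omega

lemma pvFlat_getElem (pcs : List String) (k : Nat) (hk : k < (pvFlat pcs).length) :
    (pvFlat pcs)[k] = pvCell pcs k := by
  have h1024 : k < 1024 := by rw [pvFlat_length] at hk; exact hk
  unfold pvFlat at hk ⊢
  rw [List.getElem_append]
  split
  · next h =>
    have hl : k < pcs.length := by simp at h; omega
    rw [List.getElem_take, pvCell, if_pos hl, List.getD_eq_getElem _ _ hl]
  · next h =>
    have hl : ¬ k < pcs.length := by simp at h; omega
    rw [List.getElem_replicate, pvCell, if_neg hl]

lemma pcs2row_alt_eq_cells (pcs : List String) :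
    pcs2row_alt pcs =
      (List.range 32).map (fun y => (List.range 32).map (fun x => pvCell pcs (y * 32 + x))) := by
  unfold pcs2row_alt
  have hflat : PySem.List.slice pcs none (some 1024) ++
      List.replicate (max 0 (1024 - (pcs.length : Int))).toNat "none" = pvFlat pcs := by
    rw [PySem.List.slice_to pcs (by norm_num),
      show ((1024 : Int)).toNat = 1024 from rfl,
      show (max 0 (1024 - (pcs.length : Int))).toNat = 1024 - pcs.length from by omega]
    rfl
  rw [hflat, pvRange32, List.map_map]
  refine List.map_congr_left (fun y hy => ?_)
  have hy32 : y < 32 := List.mem_range.mp hy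
  simp only [Function.comp]
  have ha : ((y : Int)) * 32 = ((y * 32 : Nat) : Int) := by push_cast; ring
  have hb : ((y : Int) + 1) * 32 = ((y * 32 : Nat) : Int) + ((32 : Nat) : Int) := by
    push_cast; ring
  rw [ha, hb, PySem.List.slice_natCast_add]
  refine List.ext_getElem ?_ (fun x hx1 hx2 => ?_)
  · simp [pvFlat_length]; omega
  · have hx32 : x < 32 := by
      simp [pvFlat_length] at hx1; omega
    have hk : y * 32 + x < (pvFlat pcs).length := by rw [pvFlat_length]; omega
    rw [List.getElem_take, List.getElem_drop, List.getElem_map, List.getElem_range,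
      ← pvFlat_getElem pcs (y * 32 + x) hk]

-- ===== VERDICT (by name: the statement is the Claim_ definition above) =====
theorem pcs2row_spec : Claim_equal_pcs2row := by
  intro pcs _
  unfold Spec_pcs2row
  rw [pcs2row_eq_cells, pcs2row_alt_eq_cells]
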